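-- pv_equiv track=rewrite | github.com/aaronleewk/LinkedIn_Scraping | src/Functions/Generate_Insights.py | get_variants
-- ===== SOURCE A (Python) =====
-- import itertools
--
-- def get_variants(array):
--     out = []
--     for each in array:
--         if len(each.split(' ')) == 1:
--             out.append(each.lower())
--             out.append(each.title())
--         else:
--             temp_cont = each.split(' ')
--             combinations = list(itertools.product([0, 1], repeat=len(temp_cont)))
--             for every in combinations:
--                 join = ""
--
--                 for i in range(len(temp_cont)):
--                     if every[i]==0:
--                         join+=(temp_cont[i].lower()+' ')
--                     else:
--                         join+=(temp_cont[i].title()+' ')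
--                 out.append(join.strip())
--         if each not in out:
--             out.append(each)
--     counter = 0
--     for each in [idx for idx, val in enumerate(out) if val in out[:idx]]:
--         del out[each-counter]
--         counter+=1
--
--     return out
-- ===== SOURCE B (Python) =====
-- def get_variants(array):
--     seen = set()
--     out = []
--
--     def emit(s):
--         if s not in seen:
--             seen.add(s)
--             out.append(s)
--
--     def rec(words, pieces):
--         # all case-variants of the remaining words, lower before title at each position
--         if not words:
--             return [' '.join(pieces).strip()]
--         w, rest = words[0], words[1:]
--         return rec(rest, pieces + [w.lower()]) + rec(rest, pieces + [w.title()])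
--
--     for each in array:
--         words = each.split(' ')
--         if len(words) == 1:
--             emit(each.lower())
--             emit(each.title())
--         else:
--             for v in rec(words, []):
--                 emit(v)
--         emit(each)
--     return out
-- ===== Notes on version B (the rewrite author's own statement) =====
-- stated objective: faster
-- what changed: B replaces itertools.product plus an index loop with a recursion over the word list that accumulates the chosen case of each word, and replaces A's post-hoc quadratic enumerate/filter-with-slice/delete dedup pass (and the linear 'each not in out' scans) with an online seen-set dedup while building the output.
import Mathlib
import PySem

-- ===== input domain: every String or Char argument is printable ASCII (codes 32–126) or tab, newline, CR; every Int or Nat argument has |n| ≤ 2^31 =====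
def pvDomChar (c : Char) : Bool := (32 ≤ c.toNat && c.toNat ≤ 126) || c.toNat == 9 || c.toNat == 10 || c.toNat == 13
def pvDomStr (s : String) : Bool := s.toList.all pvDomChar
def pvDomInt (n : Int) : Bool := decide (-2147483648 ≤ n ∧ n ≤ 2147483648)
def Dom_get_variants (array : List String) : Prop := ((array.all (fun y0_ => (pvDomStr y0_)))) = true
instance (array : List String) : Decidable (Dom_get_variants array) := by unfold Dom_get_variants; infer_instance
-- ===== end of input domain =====

-- B generates the case variants by a recursion over the word list instead of itertools.product
-- plus an index loop, and deduplicates online with a seen-set instead of A's quadratic post-hoc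
-- enumerate/filter/delete pass (objective: faster; same values in the same order).

-- ===== PORT A =====

-- hand port of str.title(): uppercase a letter that follows a non-cased character, lowercase the
-- other letters; exact on the ASCII domain, where the cased characters are exactly the letters
def pyTitleChars : List Char → Bool → List Char
  | [], _ => []
  | c :: cs, prev =>
    (if PySem.Chars.isalpha c then
        (if prev then PySem.Chars.lowerChar c else PySem.Chars.upperChar c)
      else c) :: pyTitleChars cs (PySem.Chars.isalpha c)

def pyTitle (s : String) : String := String.ofList (pyTitleChars s.toList false)

-- each.split(' '): the separator is nonempty, so split? is never none (Python never raises)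
def splitSp (s : String) : List String := (PySem.Str.split? s " ").getD []

-- list(itertools.product([0, 1], repeat=n))
def bitTuples : Nat → List (List Nat)
  | 0 => [[]]
  | n + 1 => (bitTuples n).flatMap (fun t => [t ++ [0], t ++ [1]])

-- the inner 'for i in range(len(temp_cont))' building 'join'; every[i] and temp_cont[i] are
-- always in range here, so pyGetD's default is never used
def joinLoop (tempCont : List String) (every : List Nat) : String :=
  (PySem.List.pyRange 0 tempCont.length 1).foldl
    (fun join i =>
      if PySem.List.pyGetD every i 0 == 0 then
        join ++ (PySem.Str.lower (PySem.List.pyGetD tempCont i "") ++ " ")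
      else
        join ++ (pyTitle (PySem.List.pyGetD tempCont i "") ++ " "))
    ""

-- one iteration of A's main 'for each in array' loop
def aStep (out : List String) (each : String) : List String :=
  let out :=
    if (splitSp each).length == 1 then
      out ++ [PySem.Str.lower each] ++ [pyTitle each]
    else
      let tempCont := splitSp each
      (bitTuples tempCont.length).foldl
        (fun out every => out ++ [PySem.Str.strip (joinLoop tempCont every)]) out
  if out.contains each then out else out ++ [each]

def get_variants (array : List String) : List String :=
  let out := array.foldl aStep []
  -- [idx for idx, val in enumerate(out) if val in out[:idx]]
  let idxs := ((PySem.List.enumerate out 0).filter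
      (fun p => (PySem.List.slice out none (some p.1)).contains p.2)).map (·.1)
  -- 'del out[each - counter]'; every deleted index is in range, so eraseIdx is exact here
  (idxs.foldl (fun p idx => (p.1.eraseIdx (idx - p.2).toNat, p.2 + 1)) (out, (0 : Int))).1

-- ===== PORT B =====

-- emit(s): append s to out unless already seen
def bEmit (acc : PySem.Set String × List String) (s : String) : PySem.Set String × List String :=
  if PySem.Set.contains acc.1 s then acc else (PySem.Set.add acc.1 s, acc.2 ++ [s])

-- rec(i, pieces): for each remaining word choose lower then title; join and strip at the base
def bVariants : List String → List String → List String
  | [], pieces => [PySem.Str.strip (PySem.Str.join " " pieces)]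
  | w :: ws, pieces =>
    bVariants ws (pieces ++ [PySem.Str.lower w]) ++ bVariants ws (pieces ++ [pyTitle w])

def get_variants_alt (array : List String) : List String :=
  (array.foldl
    (fun acc each =>
      let words := splitSp each
      let acc :=
        if words.length == 1 then
          bEmit (bEmit acc (PySem.Str.lower each)) (pyTitle each)
        else
          (bVariants words []).foldl bEmit acc
      bEmit acc each)
    (PySem.Set.empty, [])).2

-- ===== PRECONDITION & SPEC =====
def Spec_get_variants (array : List String) (out : List String) : Prop := out = get_variants_alt array
instance (array : List String) (out : List String) : Decidable (Spec_get_variants array out) := by unfold Spec_get_variants; infer_instance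

-- ===== CLAIM (what is proved, stated in full; the proofs are below) =====
def Claim_equal_get_variants : Prop := ∀ (array : List String), Dom_get_variants array → Spec_get_variants array (get_variants array)

-- ===== LEMMAS AND PROOFS =====

-- the variants one input string contributes (without the trailing input string itself)
def vCore (e : String) : List String :=
  if (splitSp e).length == 1 then [PySem.Str.lower e] ++ [pyTitle e]
  else bVariants (splitSp e) []

-- the whole block one input string contributes to the stream of candidate outputs
def vBlock (e : String) : List String := vCore e ++ [e]

-- first-occurrence dedup with an explicit seen list
def dfst (seen : List String) : List String → List String
  | [] => []
  | x :: xs => if x ∈ seen then dfst seen xs else x :: dfst (x :: seen) xs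

-- the indices A's final pass deletes, relative to an already-processed prefix p
def bad (p : List String) : List String → List Int
  | [] => []
  | x :: xs => (if x ∈ p then [(p.length : Int)] else []) ++ bad (p ++ [x]) xs

def chooseCase (w : String) (b : Nat) : String :=
  if b == 0 then PySem.Str.lower w else pyTitle w

def strConcat (L : List String) : String := L.foldr (· ++ ·) ""

theorem dfst_congr (l : List String) : ∀ (s s' : List String),
    (∀ x, x ∈ s ↔ x ∈ s') → dfst s l = dfst s' l := by
  induction l with
  | nil => intros; rfl
  | cons x xs ih =>
    intro s s' h
    by_cases hx : x ∈ s
    · simp only [dfst, if_pos hx, if_pos ((h x).mp hx)]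
      exact ih s s' h
    · simp only [dfst, if_neg hx, if_neg (fun hc => hx ((h x).mpr hc))]
      rw [ih (x :: s) (x :: s') (by intro y; simp [h y])]

theorem dfst_append (l : List String) : ∀ (s r : List String),
    dfst s (l ++ r) = dfst s l ++ dfst (l ++ s) r := by
  induction l with
  | nil => simp [dfst]
  | cons x xs ih =>
    intro s r
    by_cases hx : x ∈ s
    · simp only [List.cons_append, dfst, if_pos hx]
      rw [ih s r, dfst_congr r (xs ++ s) (x :: (xs ++ s))
        (by intro y; simp only [List.mem_cons, List.mem_append]
            constructor
            · tauto
            · rintro (rfl | h | h)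
              · exact Or.inr hx
              · exact Or.inl h
              · exact Or.inr h)]
    · simp only [List.cons_append, dfst, if_neg hx]
      rw [ih (x :: s) r, dfst_congr r (xs ++ x :: s) (x :: (xs ++ s))
        (by intro y; simp only [List.mem_cons, List.mem_append]; tauto)]

theorem dfst_snoc (p : List String) (x : String) :
    dfst [] (p ++ [x]) = dfst [] p ++ (if x ∈ p then [] else [x]) := by
  rw [dfst_append]
  by_cases hx : x ∈ p <;> simp [hx, dfst]

theorem dfst_length_le (l : List String) : ∀ s, (dfst s l).length ≤ l.length := by
  induction l with
  | nil => simp [dfst]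
  | cons x xs ih =>
    intro s
    simp only [dfst]
    by_cases hx : x ∈ s
    · rw [if_pos hx]; exact (ih s).trans (by simp)
    · rw [if_neg hx]; simpa using ih (x :: s)

theorem eraseIdx_append_cons (l : List String) (x : String) (xs : List String) :
    (l ++ x :: xs).eraseIdx l.length = l ++ xs := by
  induction l with
  | nil => simp
  | cons y l ih => simp [ih]

-- A's filter pass computes exactly 'bad'
theorem filter_eq_bad (xs : List String) : ∀ (p : List String),
    ((PySem.List.enumerate xs (p.length : Int)).filter
        (fun q => (PySem.List.slice (p ++ xs) none (some q.1)).contains q.2)).map (·.1)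
      = bad p xs := by
  induction xs with
  | nil => intro p; simp [PySem.List.enumerate, bad]
  | cons x xs ih =>
    intro p
    rw [PySem.List.enumerate_cons, List.filter_cons]
    have hslice : PySem.List.slice (p ++ x :: xs) none (some (p.length : Int)) = p := by
      rw [PySem.List.slice_to_natCast]
      simp
    have h2 : (p ++ [x]) ++ xs = p ++ x :: xs := by simp
    have h3 : ((p.length : Int) + 1) = (((p ++ [x]).length : Nat) : Int) := by simp
    by_cases hx : x ∈ p
    · rw [if_pos (by simp only [hslice]; exact List.contains_iff_mem.mpr hx)]
      simp only [List.map_cons, bad, if_pos hx]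
      rw [h3, ← h2, ih (p ++ [x])]
      simp
    · rw [if_neg (by simp only [hslice]; simp; exact hx)]
      simp only [bad, if_neg hx, List.nil_append]
      rw [h3, ← h2, ih (p ++ [x])]

-- A's deletion loop performs first-occurrence dedup
theorem delFold_eq_dfst (xs : List String) : ∀ (p : List String),
    ((bad p xs).foldl (fun q idx => (q.1.eraseIdx (idx - q.2).toNat, q.2 + 1))
        (dfst [] p ++ xs, (p.length : Int) - (dfst [] p).length)).1
      = dfst [] (p ++ xs) := by
  induction xs with
  | nil => intro p; simp [bad]
  | cons x xs ih =>
    intro p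
    have hle : ((dfst [] p).length : Int) ≤ (p.length : Int) := by
      exact_mod_cast dfst_length_le p []
    by_cases hx : x ∈ p
    · simp only [bad, if_pos hx, List.singleton_append, List.foldl_cons]
      have e1 : ((p.length : Int) - ((p.length : Int) - (dfst [] p).length)).toNat
          = (dfst [] p).length := by omega
      rw [e1, eraseIdx_append_cons]
      have e2 : dfst [] p = dfst [] (p ++ [x]) := by rw [dfst_snoc, if_pos hx, List.append_nil]
      rw [e2]
      have e3 : (p.length : Int) - (dfst [] (p ++ [x])).length + 1
          = ((p ++ [x]).length : Int) - (dfst [] (p ++ [x])).length := by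
        simp; omega
      rw [e3, ih (p ++ [x])]
      simp
    · simp only [bad, if_neg hx, List.nil_append]
      have e2 : dfst [] p ++ x :: xs = dfst [] (p ++ [x]) ++ xs := by
        rw [dfst_snoc, if_neg hx]; simp
      have e3 : (p.length : Int) - (dfst [] p).length
          = ((p ++ [x]).length : Int) - (dfst [] (p ++ [x])).length := by
        rw [dfst_snoc, if_neg hx]; simp
      rw [e2, e3, ih (p ++ [x])]
      simp

-- ---- the per-element variants agree ----

theorem bitTuples_cons (n : Nat) :
    bitTuples (n + 1) = (bitTuples n).map (0 :: ·) ++ (bitTuples n).map (1 :: ·) := by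
  induction n with
  | zero => rfl
  | succ n ih =>
    have hdef : ∀ m, bitTuples (m + 1) = (bitTuples m).flatMap (fun t => [t ++ [0], t ++ [1]]) :=
      fun _ => rfl
    calc bitTuples (n + 1 + 1)
        = ((bitTuples n).map (0 :: ·) ++ (bitTuples n).map (1 :: ·)).flatMap
            (fun t => [t ++ [0], t ++ [1]]) := by rw [hdef, ih]
      _ = ((bitTuples n).flatMap (fun t => [t ++ [0], t ++ [1]])).map (0 :: ·)
          ++ ((bitTuples n).flatMap (fun t => [t ++ [0], t ++ [1]])).map (1 :: ·) := by
          simp [List.flatMap_append, List.flatMap_map, List.map_flatMap]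
      _ = (bitTuples (n + 1)).map (0 :: ·) ++ (bitTuples (n + 1)).map (1 :: ·) := by
          rw [← hdef]

theorem length_of_mem_bitTuples (n : Nat) : ∀ t ∈ bitTuples n, t.length = n := by
  induction n with
  | zero => intro t ht; simp [bitTuples] at ht; simp [ht]
  | succ n ih =>
    intro t ht
    simp only [bitTuples, List.mem_flatMap] at ht
    obtain ⟨u, hu, ht⟩ := ht
    simp only [List.mem_cons] at ht
    rcases ht with rfl | rfl | h
    · simp [ih u hu]
    · simp [ih u hu]
    · simp at h

theorem strip_append_space (s : String) :
    PySem.Str.strip (s ++ " ") = PySem.Str.strip s := by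
  rw [← String.toList_inj]
  simp only [PySem.Str.toList_strip, String.toList_append]
  show PySem.Chars.strip (s.toList ++ [' ']) = PySem.Chars.strip s.toList
  simp only [PySem.Chars.strip, PySem.Chars.lstrip, PySem.Chars.rstrip]
  rw [List.dropWhile_append]
  by_cases h : (List.dropWhile PySem.Chars.isspace s.toList).isEmpty
  · rw [if_pos h]
    simp only [List.isEmpty_iff] at h
    rw [h]
    simp [List.dropWhile, show PySem.Chars.isspace ' ' = true from rfl]
  · rw [if_neg h]
    simp [show PySem.Chars.isspace ' ' = true from rfl]

theorem strConcat_space_eq_join (L : List String) (hL : L ≠ []) :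
    strConcat (L.map (· ++ " ")) = PySem.Str.join " " L ++ " " := by
  induction L with
  | nil => simp at hL
  | cons x L ih =>
    cases L with
    | nil =>
      rw [← String.toList_inj]
      simp [strConcat, PySem.Str.toList_join, PySem.Chars.join_singleton]
    | cons y L =>
      rw [← String.toList_inj] at ih ⊢
      simp only [List.map_cons, strConcat, List.foldr_cons] at ih ⊢
      rw [String.toList_append, ih (by simp)]
      simp [PySem.Str.toList_join, PySem.Chars.join_cons_cons, String.toList_append]

theorem str_foldl_concat (g : Int → String) : ∀ (l : List Int) (a : String),
    l.foldl (fun j i => j ++ g i) a = a ++ strConcat (l.map g) := by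
  intro l
  induction l with
  | nil => intro a; simp [strConcat]
  | cons i l ih =>
    intro a
    simp only [List.foldl_cons, List.map_cons, strConcat, List.foldr_cons]
    rw [ih, String.append_assoc]
    rfl

theorem joinLoop_eq_strConcat (tc : List String) (ev : List Nat)
    (hlen : ev.length = tc.length) :
    joinLoop tc ev = strConcat ((List.zipWith chooseCase tc ev).map (· ++ " ")) := by
  unfold joinLoop
  have hbody : ∀ (join : String) (i : Int),
      (if PySem.List.pyGetD ev i 0 == 0 then
        join ++ (PySem.Str.lower (PySem.List.pyGetD tc i "") ++ " ")
      else join ++ (pyTitle (PySem.List.pyGetD tc i "") ++ " "))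
      = join ++ (chooseCase (PySem.List.pyGetD tc i "") (PySem.List.pyGetD ev i 0) ++ " ") := by
    intro join i
    unfold chooseCase
    by_cases h : PySem.List.pyGetD ev i 0 == 0 <;> simp [h]
  simp only [hbody]
  rw [str_foldl_concat (fun i => chooseCase (PySem.List.pyGetD tc i "") (PySem.List.pyGetD ev i 0) ++ " ")]
  rw [String.empty_append]
  congr 1
  rw [PySem.List.pyRange_one]
  simp only [Int.sub_zero, Int.toNat_natCast, List.map_map]
  apply List.ext_getElem
  · simp [hlen]
  · intro k h1 h2
    simp only [List.getElem_map, List.getElem_range, Function.comp_apply, List.getElem_zipWith]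
    rw [show ((0 : Int) + (k : Int)) = ((k : Nat) : Int) by omega]
    rw [PySem.List.pyGetD_natCast, PySem.List.pyGetD_natCast]
    have hk : k < tc.length := by simpa using h1
    rw [List.getD_eq_getElem _ _ hk, List.getD_eq_getElem _ _ (by omega)]

set_option maxHeartbeats 1000000 in
theorem bVariants_eq_map (ws : List String) : ∀ (pieces : List String),
    bVariants ws pieces
      = (bitTuples ws.length).map
          (fun ev => PySem.Str.strip (PySem.Str.join " " (pieces ++ List.zipWith chooseCase ws ev))) := by
  induction ws with
  | nil => intro pieces; simp [bVariants, bitTuples]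
  | cons w ws ih =>
    intro pieces
    rw [show bVariants (w :: ws) pieces
        = bVariants ws (pieces ++ [PySem.Str.lower w]) ++ bVariants ws (pieces ++ [pyTitle w]) from rfl,
      List.length_cons, bitTuples_cons, List.map_append, List.map_map, List.map_map,
      ih (pieces ++ [PySem.Str.lower w]), ih (pieces ++ [pyTitle w])]
    congr 1
    · apply List.map_congr_left
      intro ev _
      simp only [Function.comp_apply, List.zipWith_cons_cons, chooseCase, beq_self_eq_true,
        if_pos]
      rw [List.append_assoc]
      rfl
    · apply List.map_congr_left
      intro ev _
      simp only [Function.comp_apply, List.zipWith_cons_cons, chooseCase]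
      rw [if_neg (by decide), List.append_assoc]
      rfl

theorem strip_joinLoop (tc : List String) (ev : List Nat) (hlen : ev.length = tc.length) :
    PySem.Str.strip (joinLoop tc ev)
      = PySem.Str.strip (PySem.Str.join " " (List.zipWith chooseCase tc ev)) := by
  by_cases hl : List.zipWith chooseCase tc ev = []
  · rw [joinLoop_eq_strConcat tc ev hlen, hl]
    rfl
  · rw [joinLoop_eq_strConcat tc ev hlen, strConcat_space_eq_join _ hl, strip_append_space]

-- A's product-and-index loop produces exactly B's recursive variants
theorem aBlock_eq (tc : List String) (out0 : List String) :
    (bitTuples tc.length).foldl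
        (fun out every => out ++ [PySem.Str.strip (joinLoop tc every)]) out0
      = out0 ++ bVariants tc [] := by
  rw [PySem.List.foldl_append_singleton_eq_map]
  congr 1
  rw [bVariants_eq_map]
  apply List.map_congr_left
  intro ev hev
  rw [strip_joinLoop tc ev (length_of_mem_bitTuples _ ev hev), List.nil_append]

theorem aStep_eq (o : List String) (e : String) :
    aStep o e = if e ∈ o ++ vCore e then o ++ vCore e else o ++ vBlock e := by
  have hcore : (if ((splitSp e).length == 1) = true then
        o ++ [PySem.Str.lower e] ++ [pyTitle e]
      else (bitTuples (splitSp e).length).foldl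
          (fun out every => out ++ [PySem.Str.strip (joinLoop (splitSp e) every)]) o)
      = o ++ vCore e := by
    unfold vCore
    by_cases h : ((splitSp e).length == 1) = true
    · rw [if_pos h, if_pos h, List.append_assoc]
    · rw [if_neg h, if_neg h, aBlock_eq]
  show (if (if ((splitSp e).length == 1) = true then
        o ++ [PySem.Str.lower e] ++ [pyTitle e]
      else (bitTuples (splitSp e).length).foldl
          (fun out every => out ++ [PySem.Str.strip (joinLoop (splitSp e) every)]) o).contains e
        = true then _ else _) = _
  rw [hcore]
  simp only [List.contains_iff_mem, vBlock, List.append_assoc]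

-- ---- the two main loops against first-occurrence dedup ----

theorem aFold (arr : List String) : ∀ (o s : List String),
    dfst s (arr.foldl aStep o)
      = dfst s o ++ dfst (o ++ s) (arr.flatMap vBlock) := by
  induction arr with
  | nil => intro o s; simp [dfst]
  | cons e arr ih =>
    intro o s
    rw [List.foldl_cons, ih, aStep_eq]
    by_cases h : e ∈ o ++ vCore e
    · rw [if_pos h]
      have he : e ∈ vCore e ++ (o ++ s) := by
        rcases List.mem_append.mp h with h1 | h2
        · exact List.mem_append.mpr (Or.inr (List.mem_append.mpr (Or.inl h1)))
        · exact List.mem_append.mpr (Or.inl h2)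
      rw [List.flatMap_cons, dfst_append (vBlock e) (o ++ s) _, dfst_append o s (vCore e),
        show vBlock e = vCore e ++ [e] from rfl, dfst_append (vCore e) (o ++ s) [e],
        show dfst (vCore e ++ (o ++ s)) [e] = [] from by simp [dfst, he]]
      rw [List.append_nil, List.append_assoc]
      congr 1
      congr 1
      apply dfst_congr
      intro y
      simp only [List.mem_append, List.mem_cons, List.not_mem_nil]
      constructor
      · rintro ((h1 | h1) | h1)
        · tauto
        · tauto
        · tauto
      · rintro ((h1 | rfl | h1) | h1)
        · tauto
        · rcases List.mem_append.mp h with h1 | h2 <;> tauto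
        · tauto
        · tauto
    · rw [if_neg h]
      rw [List.flatMap_cons, dfst_append (vBlock e) (o ++ s) _, dfst_append o s (vBlock e),
        List.append_assoc]
      congr 1
      congr 1
      apply dfst_congr
      intro y
      simp only [List.mem_append]
      tauto

theorem bFold (l : List String) : ∀ (s : PySem.Set String) (o t : List String),
    (∀ x, PySem.Set.contains s x = true ↔ x ∈ t) →
    (l.foldl bEmit (s, o)).2 = o ++ dfst t l
      ∧ ∀ x, PySem.Set.contains (l.foldl bEmit (s, o)).1 x = true ↔ x ∈ l ++ t := by
  induction l with
  | nil => intro s o t h; exact ⟨by simp [dfst], by simpa using h⟩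
  | cons x xs ih =>
    intro s o t h
    by_cases hx : PySem.Set.contains s x = true
    · rw [List.foldl_cons, show bEmit (s, o) x = (s, o) from by unfold bEmit; rw [if_pos hx]]
      have hxt := (h x).mp hx
      obtain ⟨h1, h2⟩ := ih s o t h
      refine ⟨by rw [h1]; rw [show dfst t (x :: xs) = dfst t xs from by simp [dfst, hxt]],
        fun y => ?_⟩
      rw [h2 y]
      simp only [List.cons_append, List.mem_cons, List.mem_append]
      constructor
      · tauto
      · rintro (rfl | h3 | h3) <;> tauto
    · rw [List.foldl_cons,
        show bEmit (s, o) x = (s ++ [x], o ++ [x]) from by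
          unfold bEmit
          rw [if_neg hx]
          unfold PySem.Set.add
          rw [if_neg hx]]
      have hxt : x ∉ t := fun hc => hx ((h x).mpr hc)
      obtain ⟨h1, h2⟩ := ih (s ++ [x]) (o ++ [x]) (x :: t)
        (by intro y
            simp only [PySem.Set.contains, List.contains_iff_mem, List.mem_append,
              List.mem_cons]
            rw [← List.contains_iff_mem, show List.contains s y = PySem.Set.contains s y from rfl,
              h y]
            tauto)
      refine ⟨?_, fun y => ?_⟩
      · rw [h1, List.append_assoc,
          show dfst t (x :: xs) = x :: dfst (x :: t) xs from by simp [dfst, hxt]]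
        simp
      · rw [h2 y]
        simp only [List.cons_append, List.mem_cons, List.mem_append]
        tauto

theorem alt_eq_dfst (arr : List String) :
    get_variants_alt arr = dfst [] (arr.flatMap vBlock) := by
  unfold get_variants_alt
  have hstep : ∀ (acc : PySem.Set String × List String) (e : String),
      (let words := splitSp e
       let acc' := if words.length == 1 then
           bEmit (bEmit acc (PySem.Str.lower e)) (pyTitle e)
         else (bVariants words []).foldl bEmit acc
       bEmit acc' e) = (vBlock e).foldl bEmit acc := by
    intro acc e
    show bEmit (if ((splitSp e).length == 1) = true then
        bEmit (bEmit acc (PySem.Str.lower e)) (pyTitle e)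
      else (bVariants (splitSp e) []).foldl bEmit acc) e = _
    unfold vBlock vCore
    by_cases h : ((splitSp e).length == 1) = true
    · rw [if_pos h, if_pos h]
      rfl
    · rw [if_neg h, if_neg h, List.foldl_append]
      rfl
  simp only [hstep]
  rw [← List.foldl_flatMap]
  have := bFold (arr.flatMap vBlock) PySem.Set.empty [] []
    (by intro x; simp [PySem.Set.contains, PySem.Set.empty])
  rw [this.1, List.nil_append]

theorem a_eq_dfst (arr : List String) :
    get_variants arr = dfst [] (arr.flatMap vBlock) := by
  simp only [get_variants]
  have h1 : ((PySem.List.enumerate (arr.foldl aStep []) 0).filter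
      (fun p => (PySem.List.slice (arr.foldl aStep []) none (some p.1)).contains p.2)).map (·.1)
      = bad [] (arr.foldl aStep []) := by
    have := filter_eq_bad (arr.foldl aStep []) []
    simpa using this
  rw [h1]
  have h2 := delFold_eq_dfst (arr.foldl aStep []) []
  simp only [dfst, List.nil_append, List.length_nil, Nat.cast_zero, Int.zero_sub] at h2
  rw [show (-0 : Int) = (0 : Int) by simp] at h2
  rw [h2]
  have h3 := aFold arr [] []
  simp only [List.nil_append, dfst] at h3
  rw [h3]

-- ===== VERDICT (by name: the statement is the Claim_ definition above) =====
theorem get_variants_spec : Claim_equal_get_variants := by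
  intro arr _
  unfold Spec_get_variants
  rw [a_eq_dfst, alt_eq_dfst]
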